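-- pv_equiv track=rewrite | github.com/1000zoo/python-leetcode | 2.medium/binary_subarrays_with_sum.py | prefixSumSolution
-- ===== SOURCE A (Python) =====
-- def prefixSumSolution(nums: list[int], goal: int) -> int:
--     from collections import defaultdict
--
--     answer = 0
--     prefix = 0
--     table = defaultdict(int)
--     table[0] = 1
--
--     for num in nums:
--         prefix += num
--
--         diff = prefix - goal
--         answer += table[diff]
--
--         table[prefix] += 1
--
--     return answer
-- ===== SOURCE B (Python) =====
-- def prefixSumSolution(nums: list[int], goal: int) -> int:
--     answer = 0
--     n = len(nums)
--     for i in range(n):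
--         cur = 0
--         for j in range(i, n):
--             cur += nums[j]
--             if cur == goal:
--                 answer += 1
--     return answer
-- ===== Notes on version B (the rewrite author's own statement) =====
-- stated objective: simpler
-- what changed: Replaced the prefix-sum hashmap counting with a direct nested double loop: for each start index, extend a running sum over end indices and count whenever it equals goal; no table, no global prefix.
import Mathlib
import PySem

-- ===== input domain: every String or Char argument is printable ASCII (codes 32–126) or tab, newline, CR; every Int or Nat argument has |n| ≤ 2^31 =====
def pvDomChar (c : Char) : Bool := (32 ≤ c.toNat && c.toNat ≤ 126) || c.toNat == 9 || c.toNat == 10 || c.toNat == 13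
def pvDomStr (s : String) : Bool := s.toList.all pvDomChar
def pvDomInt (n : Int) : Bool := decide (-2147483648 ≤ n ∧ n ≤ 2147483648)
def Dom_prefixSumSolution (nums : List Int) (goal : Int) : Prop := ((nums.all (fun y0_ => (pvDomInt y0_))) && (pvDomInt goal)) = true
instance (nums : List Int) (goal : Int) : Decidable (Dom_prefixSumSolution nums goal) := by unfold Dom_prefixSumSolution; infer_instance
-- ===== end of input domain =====

-- B replaces A's prefix-sum hashmap with a direct nested double loop over (start, end) pairs: simpler, no table (O(n^2) vs A's O(n); no speed claim).

-- ===== PORT A =====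
-- the for-loop, state (prefix, answer, table); 'answer += table[diff]' is a defaultdict
-- read ported as getD (the 0 it would insert never changes any later getD result or the
-- returned int), and 'table[prefix] += 1' is insert of (old value via getD 0) + 1 — exact.
def pvLoopA (goal : Int) : List Int → Int → Int → PySem.Dict Int Int → Int
  | [], _, answer, _ => answer
  | num :: rest, pfx, answer, table =>
      let pfx := pfx + num
      let diff := pfx - goal
      let answer := answer + table.getD diff 0
      pvLoopA goal rest pfx answer (table.insert pfx (table.getD pfx 0 + 1))

def prefixSumSolution (nums : List Int) (goal : Int) : Int :=
  pvLoopA goal nums 0 0 (PySem.Dict.empty.insert 0 1)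

-- ===== PORT B =====
-- inner loop: cur starts at the running value, scan the rest of the list (the suffix nums[i:])
def pvScan (goal : Int) : Int → List Int → Int
  | _, [] => 0
  | cur, x :: xs => (if cur + x = goal then 1 else 0) + pvScan goal (cur + x) xs

-- outer loop: one inner scan per start index i, i.e. per nonempty suffix
def pvStarts (goal : Int) : List Int → Int
  | [] => 0
  | x :: xs => pvScan goal 0 (x :: xs) + pvStarts goal xs

def prefixSumSolution_alt (nums : List Int) (goal : Int) : Int :=
  pvStarts goal nums

-- ===== PRECONDITION & SPEC =====
def Spec_prefixSumSolution (nums : List Int) (goal : Int) (out : Int) : Prop := out = prefixSumSolution_alt nums goal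
instance (nums : List Int) (goal : Int) (out : Int) : Decidable (Spec_prefixSumSolution nums goal out) := by unfold Spec_prefixSumSolution; infer_instance

-- ===== CLAIM (what is proved, stated in full; the proofs are below) =====
def Claim_equal_prefixSumSolution : Prop := ∀ (nums : List Int) (goal : Int), Dom_prefixSumSolution nums goal → Spec_prefixSumSolution nums goal (prefixSumSolution nums goal)

-- ===== LEMMAS AND PROOFS =====

-- abstraction of A's loop: only the count-of-each-prefix function matters, not the dict
def pvF (goal : Int) : List Int → Int → (Int → Int) → Int
  | [], _, _ => 0
  | n :: ns, P, c =>
      c (P + n - goal) + pvF goal ns (P + n) (fun q => if q = P + n then c q + 1 else c q)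

-- the inner-scan contributions of all proper suffixes
def pvTail (goal : Int) : List Int → Int
  | [] => 0
  | _ :: ns => pvScan goal 0 ns + pvTail goal ns

theorem pvLoopA_eq (goal : Int) (ns : List Int) : ∀ (P ans : Int) (table : PySem.Dict Int Int),
    pvLoopA goal ns P ans table = ans + pvF goal ns P (fun q => table.getD q 0) := by
  induction ns with
  | nil => intro P ans table; simp [pvLoopA, pvF]
  | cons n ns ih =>
      intro P ans table
      simp only [pvLoopA, pvF]
      rw [ih]
      have hfun : (fun q => (table.insert (P + n) (table.getD (P + n) 0 + 1)).getD q 0)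
          = (fun q => if q = P + n then table.getD q 0 + 1 else table.getD q 0) := by
        funext q
        rw [PySem.Dict.getD_insert]
        split_ifs with h
        · subst h; rfl
        · rfl
      rw [hfun]; ring

theorem pvF_delta (goal : Int) (ns : List Int) : ∀ (P h : Int) (c : Int → Int),
    pvF goal ns P (fun q => c q + (if q = h then 1 else 0))
      = pvScan goal (P - h) ns + pvF goal ns P c := by
  induction ns with
  | nil => intro P h c; simp [pvF, pvScan]
  | cons n ns ih =>
      intro P h c
      simp only [pvF, pvScan]
      have hfun : (fun q => if q = P + n then (fun q => c q + (if q = h then 1 else 0)) q + 1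
                    else (fun q => c q + (if q = h then 1 else 0)) q)
          = (fun q => (fun q' => if q' = P + n then c q' + 1 else c q') q + (if q = h then 1 else 0)) := by
        funext q; by_cases hq : q = P + n <;> simp [hq] <;> ring
      rw [hfun, ih]
      have h1 : (if P + n - goal = h then (1:Int) else 0) = (if P - h + n = goal then 1 else 0) := by
        split_ifs with a b <;> omega
      have h2 : P + n - h = P - h + n := by ring
      rw [h1, h2]; ring

theorem pvF_zero (goal : Int) (ns : List Int) : ∀ (P : Int),
    pvF goal ns P (fun _ => 0) = pvTail goal ns := by
  induction ns with
  | nil => intro P; simp [pvF, pvTail]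
  | cons n ns ih =>
      intro P
      simp only [pvF, pvTail]
      have hfun : (fun q => if q = P + n then ((fun _ => (0:Int)) q) + 1 else (fun _ => (0:Int)) q)
          = (fun q => (fun _ => (0:Int)) q + (if q = P + n then 1 else 0)) := by
        funext q; split_ifs <;> simp
      rw [hfun, pvF_delta, ih]
      simp

theorem pvStarts_eq (goal : Int) (ns : List Int) :
    pvStarts goal ns = pvScan goal 0 ns + pvTail goal ns := by
  induction ns with
  | nil => simp [pvStarts, pvScan, pvTail]
  | cons n ns ih => simp only [pvStarts, pvTail]; omega

-- ===== VERDICT (by name: the statement is the Claim_ definition above) =====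
theorem prefixSumSolution_spec : Claim_equal_prefixSumSolution := by
  intro nums goal _
  unfold Spec_prefixSumSolution prefixSumSolution prefixSumSolution_alt
  rw [pvLoopA_eq]
  have hfun : (fun q => (PySem.Dict.empty.insert (0:Int) (1:Int)).getD q 0)
      = (fun q => (fun _ => (0:Int)) q + (if q = 0 then 1 else 0)) := by
    funext q
    rw [PySem.Dict.getD_insert]
    split_ifs <;> simp [PySem.Dict.getD_empty]
  rw [hfun, pvF_delta, pvF_zero, pvStarts_eq]
  norm_num
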